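-- pv_equiv track=rewrite | github.com/rahulsamant37/Daily-Task | codeforces/cp-templates/python/string-algorithms/ZAlgirthm.py | all_occurrences_z
-- ===== SOURCE A (Python) =====
-- def z_function(s):
--     """
--     Z-algorithm implementation
--     z[i] = length of longest substring starting from s[i] which is also prefix of s
--     Time complexity: O(n)
--
--     Args:
--         s: input string
--
--     Returns:
--         z array where z[i] is length of longest common prefix of s and s[i:]
--     """
--     n = len(s)
--     z = [0] * n
--     z[0] = n
--
--     l, r = 0, 0
--     for i in range(1, n):
--         if i <= r:
--             z[i] = min(r - i + 1, z[i - l])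
--
--         while i + z[i] < n and s[z[i]] == s[i + z[i]]:
--             z[i] += 1
--
--         if i + z[i] - 1 > r:
--             l, r = i, i + z[i] - 1
--
--     return z
--
-- def all_occurrences_z(text, pattern):
--     """
--     Find all occurrences with additional information
--
--     Returns:
--         list of (position, match_length) tuples
--     """
--     combined = pattern + '#' + text
--     z = z_function(combined)
--
--     results = []
--     pattern_len = len(pattern)
--
--     for i in range(pattern_len + 1, len(combined)):
--         if z[i] > 0:
--             text_pos = i - pattern_len - 1
--             results.append((text_pos, z[i]))
--
--     return results
-- ===== SOURCE B (Python) =====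
-- def _lcp(a, b):
--     """Length of the longest common prefix of two strings."""
--     k = 0
--     for x, y in zip(a, b):
--         if x != y:
--             break
--         k += 1
--     return k
--
-- def all_occurrences_z(text, pattern):
--     combined = pattern + '#' + text
--     p = len(pattern)
--     results = []
--     for i in range(p + 1, len(combined)):
--         k = _lcp(combined, combined[i:])
--         if k > 0:
--             results.append((i - p - 1, k))
--     return results
-- ===== Notes on version B (the rewrite author's own statement) =====
-- stated objective: simpler
-- what changed: Replaces the Z-algorithm's l/r window bookkeeping with a direct per-position longest-common-prefix scan of combined against combined[i:], collecting the same (position, length) pairs.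
import Mathlib
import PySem

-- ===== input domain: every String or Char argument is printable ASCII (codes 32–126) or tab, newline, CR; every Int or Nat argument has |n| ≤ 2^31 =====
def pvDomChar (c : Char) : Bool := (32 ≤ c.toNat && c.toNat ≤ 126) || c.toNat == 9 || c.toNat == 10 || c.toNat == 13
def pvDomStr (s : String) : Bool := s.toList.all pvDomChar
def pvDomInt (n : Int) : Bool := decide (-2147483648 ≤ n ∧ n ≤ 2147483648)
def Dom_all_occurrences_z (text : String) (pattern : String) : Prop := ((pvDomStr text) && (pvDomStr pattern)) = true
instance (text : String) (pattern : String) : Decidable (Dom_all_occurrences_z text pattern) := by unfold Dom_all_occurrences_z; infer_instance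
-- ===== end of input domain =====

-- B replaces the Z-algorithm's l/r-window bookkeeping by a direct longest-common-prefix
-- scan at each position (simpler, same results; not faster).

-- ===== PORT A =====

-- the inner 'while i + z[i] < n and s[z[i]] == s[i + z[i]]: z[i] += 1', with k playing z[i]
def zwhile (s : List Char) (i : Nat) (k : Nat) : Nat :=
  if h : i + k < s.length ∧ s.getD k ' ' = s.getD (i + k) ' ' then
    zwhile s i (k + 1)
  else k
termination_by s.length - (i + k)
decreasing_by omega

-- the 'for i in range(1, n)' loop of z_function, state (z, l, r)
def zloopA (s : List Char) (z : List Nat) (l r i : Nat) : List Nat :=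
  if _h : i < s.length then
    let start := if i ≤ r then min (r - i + 1) (z.getD (i - l) 0) else z.getD i 0
    let k := zwhile s i start
    let z' := z.set i k
    if i + k - 1 > r then zloopA s z' i (i + k - 1) (i + 1)
    else zloopA s z' l r (i + 1)
  else z
termination_by s.length - i

def z_function (s : List Char) : List Nat :=
  let n := s.length
  let z := (List.replicate n 0).set 0 n
  zloopA s z 0 0 1

def all_occurrences_z (text : String) (pattern : String) : List (Int × Int) :=
  let combined := pattern.toList ++ '#' :: text.toList
  let z := z_function combined
  let plen := pattern.toList.length
  (List.range' (plen + 1) (combined.length - (plen + 1))).foldl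
    (fun acc i =>
      if z.getD i 0 > 0 then acc ++ [(((i : Int) - plen - 1), (z.getD i 0 : Int))]
      else acc) []

-- ===== PORT B =====

-- _lcp: length of the longest common prefix (the zip loop of Source B)
def lcpB : List Char → List Char → Nat
  | a :: as, b :: bs => if a = b then lcpB as bs + 1 else 0
  | _, _ => 0

def all_occurrences_z_alt (text : String) (pattern : String) : List (Int × Int) :=
  let combined := pattern.toList ++ '#' :: text.toList
  let plen := pattern.toList.length
  (List.range' (plen + 1) (combined.length - (plen + 1))).foldl
    (fun acc i =>
      let k := lcpB combined (combined.drop i)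
      if k > 0 then acc ++ [(((i : Int) - plen - 1), (k : Int))] else acc) []

-- ===== PRECONDITION & SPEC =====
def Spec_all_occurrences_z (text : String) (pattern : String) (out : List (Int × Int)) : Prop := out = all_occurrences_z_alt text pattern
instance (text : String) (pattern : String) (out : List (Int × Int)) : Decidable (Spec_all_occurrences_z text pattern out) := by unfold Spec_all_occurrences_z; infer_instance

-- ===== CLAIM (what is proved, stated in full; the proofs are below) =====
def Claim_equal_all_occurrences_z : Prop := ∀ (text : String) (pattern : String), Dom_all_occurrences_z text pattern → Spec_all_occurrences_z text pattern (all_occurrences_z text pattern)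

-- ===== LEMMAS AND PROOFS =====

-- abbreviation used only by the proofs: the true Z-value at i
def zv (s : List Char) (i : Nat) : Nat := lcpB s (s.drop i)

theorem lcpB_le_right : ∀ (a b : List Char), lcpB a b ≤ b.length := by
  intro a
  induction a with
  | nil => intro b; cases b <;> simp [lcpB]
  | cons x as ih =>
    intro b; cases b with
    | nil => simp [lcpB]
    | cons y bs =>
      simp only [lcpB]; split
      · simpa using ih bs
      · simp

theorem lcpB_elem : ∀ (a b : List Char) (t : Nat), t < lcpB a b →
    a.getD t ' ' = b.getD t ' ' := by
  intro a
  induction a with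
  | nil => intro b t h; cases b <;> simp [lcpB] at h
  | cons x as ih =>
    intro b t h
    cases b with
    | nil => simp [lcpB] at h
    | cons y bs =>
      simp only [lcpB] at h
      split at h
      · cases t with
        | zero => simpa using ‹x = y›
        | succ t' => simpa using ih bs t' (by omega)
      · omega

theorem lcpB_ge : ∀ (a b : List Char) (m : Nat), m ≤ a.length → m ≤ b.length →
    (∀ t, t < m → a.getD t ' ' = b.getD t ' ') → m ≤ lcpB a b := by
  intro a
  induction a with
  | nil => intro b m h1 _ _; simp at h1; omega
  | cons x as ih =>
    intro b m h1 h2 h3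
    cases m with
    | zero => omega
    | succ m' =>
      cases b with
      | nil => simp at h2
      | cons y bs =>
        have hxy : x = y := by simpa using h3 0 (by omega)
        simp only [lcpB, if_pos hxy]
        have := ih bs m' (by simpa using h1) (by simpa using h2)
          (fun t ht => by simpa using h3 (t + 1) (by omega))
        omega

theorem lcpB_max : ∀ (a b : List Char), lcpB a b < a.length → lcpB a b < b.length →
    a.getD (lcpB a b) ' ' ≠ b.getD (lcpB a b) ' ' := by
  intro a
  induction a with
  | nil => intro b h1 _; cases b <;> simp [lcpB] at h1
  | cons x as ih =>
    intro b h1 h2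
    cases b with
    | nil => simp at h2
    | cons y bs =>
      by_cases hxy : x = y
      · simp only [lcpB, if_pos hxy] at h1 h2 ⊢
        simpa [List.getD_cons_succ] using ih bs (by simpa using h1) (by simpa using h2)
      · simp only [lcpB, if_neg hxy]
        simpa [List.getD_cons_zero] using hxy

theorem getD_drop (s : List Char) (i t : Nat) :
    (s.drop i).getD t ' ' = s.getD (i + t) ' ' := by
  simp [List.getD, List.getElem?_drop]

theorem zv_le (s : List Char) (i : Nat) : zv s i ≤ s.length - i := by
  have := lcpB_le_right s (s.drop i)
  simpa [zv] using this

theorem zv_elem (s : List Char) (i t : Nat) (h : t < zv s i) :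
    s.getD t ' ' = s.getD (i + t) ' ' := by
  have := lcpB_elem s (s.drop i) t h
  rwa [getD_drop] at this

theorem zwhile_eq (s : List Char) (i : Nat) (hi : 1 ≤ i) :
    ∀ k, k ≤ zv s i → zwhile s i k = zv s i := by
  intro k hk
  by_cases hlt : k < zv s i
  · have hik : i + k < s.length := by have := zv_le s i; omega
    have hel : s.getD k ' ' = s.getD (i + k) ' ' := zv_elem s i k hlt
    rw [zwhile, dif_pos ⟨hik, hel⟩]
    exact zwhile_eq s i hi (k + 1) (by omega)
  · have hke : k = zv s i := by omega
    rw [zwhile, dif_neg]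
    · exact hke
    rintro ⟨h1, h2⟩
    subst hke
    -- extend the lcp by one: contradiction with maximality
    have hlen1 : zv s i < s.length := by omega
    have hlen2 : zv s i < (s.drop i).length := by
      simp only [List.length_drop]; omega
    have := lcpB_max s (s.drop i) hlen1 hlen2
    rw [getD_drop] at this
    exact this h2
termination_by k => zv s i - k

-- A's l/r window gives a sound starting value for the while loop
theorem window_le (s : List Char) (l r i : Nat) (hl : 1 ≤ l) (hli : l < i) (hir : i ≤ r)
    (hr : r + 1 = l + zv s l) : min (r - i + 1) (zv s (i - l)) ≤ zv s i := by
  have hrn : r < s.length := by have := zv_le s l; omega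
  apply lcpB_ge
  · omega
  · simp only [List.length_drop]; omega
  · intro t ht
    have h1 : s.getD t ' ' = s.getD ((i - l) + t) ' ' := zv_elem s (i - l) t (by omega)
    have h2 : s.getD ((i - l) + t) ' ' = s.getD (l + ((i - l) + t)) ' ' :=
      zv_elem s l ((i - l) + t) (by omega)
    rw [getD_drop, h1, h2]
    congr 1
    omega

-- main invariant proof for A's loop
theorem zloopA_correct (s : List Char) :
    ∀ (fuel : Nat) (i : Nat) (z : List Nat) (l r : Nat), s.length - i ≤ fuel → 1 ≤ i →
    z.length = s.length →
    (∀ j, 1 ≤ j → j < i → z.getD j 0 = zv s j) →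
    (∀ j, i ≤ j → j < s.length → z.getD j 0 = 0) →
    ((l = 0 ∧ r = 0) ∨ (1 ≤ l ∧ l < i ∧ r + 1 = l + zv s l)) →
    ∀ j, 1 ≤ j → j < s.length → (zloopA s z l r i).getD j 0 = zv s j := by
  intro fuel
  induction fuel with
  | zero =>
    intro i z l r hfuel hi hlen hdone _ _ j hj1 hj2
    rw [zloopA, dif_neg (by omega)]
    exact hdone j hj1 (by omega)
  | succ f ih =>
    intro i z l r hfuel hi hlen hdone hzero hinv j hj1 hj2
    by_cases hin : i < s.length
    · rw [zloopA, dif_pos hin]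
      simp only
      have hstart : (if i ≤ r then min (r - i + 1) (z.getD (i - l) 0) else z.getD i 0) ≤ zv s i := by
        split <;> rename_i hir
        · rcases hinv with ⟨hl0, hr0⟩ | ⟨hl1, hli, hr⟩
          · omega
          · have hj' : z.getD (i - l) 0 = zv s (i - l) :=
              hdone (i - l) (by omega) (by omega)
            rw [hj']
            exact window_le s l r i hl1 hli hir hr
        · rw [hzero i (le_refl i) hin]; omega
      have hk : zwhile s i (if i ≤ r then min (r - i + 1) (z.getD (i - l) 0) else z.getD i 0) = zv s i :=
        zwhile_eq s i hi _ hstart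
      rw [hk]
      have hlen' : (z.set i (zv s i)).length = s.length := by simpa using hlen
      have hdone' : ∀ j', 1 ≤ j' → j' < i + 1 → (z.set i (zv s i)).getD j' 0 = zv s j' := by
        intro j' h1 h2
        by_cases hji : j' = i
        · subst hji
          simp [List.getD, List.getElem?_set_self (by omega : j' < z.length)]
        · have : (z.set i (zv s i)).getD j' 0 = z.getD j' 0 := by
            simp [List.getD, List.getElem?_set_ne (by omega : i ≠ j')]
          rw [this]; exact hdone j' h1 (by omega)
      have hzero' : ∀ j', i + 1 ≤ j' → j' < s.length → (z.set i (zv s i)).getD j' 0 = 0 := by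
        intro j' h1 h2
        have : (z.set i (zv s i)).getD j' 0 = z.getD j' 0 := by
          simp [List.getD, List.getElem?_set_ne (by omega : i ≠ j')]
        rw [this]; exact hzero j' (by omega) h2
      split <;> rename_i hup
      · exact ih (i + 1) (z.set i (zv s i)) i (i + zv s i - 1) (by omega) (by omega)
          hlen' hdone' hzero'
          (Or.inr ⟨by omega, by omega, by omega⟩) j hj1 hj2
      · refine ih (i + 1) (z.set i (zv s i)) l r (by omega) (by omega)
          hlen' hdone' hzero' ?_ j hj1 hj2
        rcases hinv with h | ⟨h1, h2, h3⟩
        · exact Or.inl h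
        · exact Or.inr ⟨h1, by omega, h3⟩
    · rw [zloopA, dif_neg hin]
      exact hdone j hj1 (by omega)

theorem z_function_correct (s : List Char) (j : Nat) (h1 : 1 ≤ j) (h2 : j < s.length) :
    (z_function s).getD j 0 = zv s j := by
  unfold z_function
  refine zloopA_correct s s.length 1 ((List.replicate s.length 0).set 0 s.length) 0 0
    (by omega) (le_refl 1) (by simp) ?_ ?_ (Or.inl ⟨rfl, rfl⟩) j h1 h2
  · intro j' hj1 hj2; omega
  · intro j' hj1 hj2
    have h0 : (0 : Nat) ≠ j' := by omega
    simp [List.getD, hj2, List.getElem_replicate, h0]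

theorem foldl_congr_eq {α β : Type} (xs : List β) (F G : α → β → α)
    (h : ∀ b, b ∈ xs → ∀ acc, F acc b = G acc b) :
    ∀ acc, xs.foldl F acc = xs.foldl G acc := by
  induction xs with
  | nil => intro acc; rfl
  | cons x xs ih =>
    intro acc
    simp only [List.foldl_cons]
    rw [h x (by simp) acc]
    exact ih (fun b hb acc' => h b (List.mem_cons_of_mem _ hb) acc') _

-- ===== VERDICT (by name: the statement is the Claim_ definition above) =====
theorem all_occurrences_z_spec : Claim_equal_all_occurrences_z := by
  intro text pattern _
  unfold Spec_all_occurrences_z all_occurrences_z all_occurrences_z_alt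
  simp only
  apply foldl_congr_eq
  intro i hi acc
  have hmem := List.mem_range'.mp hi
  have hcomb : (pattern.toList ++ '#' :: text.toList).length
      = pattern.toList.length + 1 + text.toList.length := by
    simp; omega
  have hz : (z_function (pattern.toList ++ '#' :: text.toList)).getD i 0
      = lcpB (pattern.toList ++ '#' :: text.toList)
          ((pattern.toList ++ '#' :: text.toList).drop i) := by
    apply z_function_correct
    · omega
    · omega
  rw [hz]
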